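-- pv_equiv track=rewrite | github.com/paulozava/exerciscm | python/acronym/acronym.py | pradronization
-- ===== SOURCE A (Python) =====
-- from string import punctuation as punctuations
--
-- def pradronization(words):
--     no_space, single_space, double_space = '', ' ', '  '
--     words = words.replace('-', single_space)
--     for punctuation in punctuations:
--         words = words.replace(punctuation, no_space)
--     while double_space in words:
--         words = words.replace(double_space, single_space)
--     words = words.upper()
--     return words
-- ===== SOURCE B (Python) =====
-- from string import punctuation as punctuations
--
-- def pradronization(words):
--     punct = set(punctuations)
--     out = []
--     last_space = False
--     for ch in words:
--         if ch == '-' or ch == ' ':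
--             if not last_space:
--                 out.append(' ')
--                 last_space = True
--         elif ch in punct:
--             continue
--         else:
--             out.append(ch.upper())
--             last_space = False
--     return ''.join(out)
-- ===== Notes on version B (the rewrite author's own statement) =====
-- stated objective: alternative
-- what changed: Replaced A's 33 whole-string replace passes plus a double-space fixpoint while-loop with a single left-to-right scan keeping a last-emitted-was-space flag and a prebuilt punctuation set.
import Mathlib
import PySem

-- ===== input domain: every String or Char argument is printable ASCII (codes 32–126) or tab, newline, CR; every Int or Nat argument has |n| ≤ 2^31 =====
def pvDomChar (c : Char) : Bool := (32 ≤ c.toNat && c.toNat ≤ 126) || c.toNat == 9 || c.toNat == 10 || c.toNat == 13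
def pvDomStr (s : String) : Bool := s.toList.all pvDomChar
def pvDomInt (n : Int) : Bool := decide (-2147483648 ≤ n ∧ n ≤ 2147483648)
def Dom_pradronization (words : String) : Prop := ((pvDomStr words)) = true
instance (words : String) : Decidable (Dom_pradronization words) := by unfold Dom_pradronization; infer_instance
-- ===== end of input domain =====

-- B is an alternative single-pass algorithm: one linear scan with a last-emitted-was-space flag
-- instead of A's 33 whole-string replace passes plus a double-space fixpoint while-loop.

-- string.punctuation, in CPython's order
def punctChars : List Char := "!\"#$%&'()*+,-./:;<=>?@[\\]^_`{|}~".toList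

-- ===== PORT A =====
-- helper used only to prove termination of A's while-loop port:
-- one replace pass '  ' -> ' ' (leftmost, non-overlapping), as a recursive function
def squeezeOnce : List Char → List Char
  | [] => []
  | [c] => [c]
  | c :: d :: t => if c = ' ' ∧ d = ' ' then ' ' :: squeezeOnce t else c :: squeezeOnce (d :: t)

-- boolean "s contains two adjacent spaces"
def ddSpace : List Char → Bool
  | [] => false
  | [_] => false
  | c :: d :: t => (decide (c = ' ') && decide (d = ' ')) || ddSpace (d :: t)

theorem replace_go_dspace (fuel : Nat) (l acc : List Char) (h : l.length ≤ fuel) :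
    PySem.Chars.replace.go [' ', ' '] [' '] fuel l acc = acc.reverse ++ squeezeOnce l := by
  induction fuel generalizing l acc with
  | zero =>
    have : l = [] := List.length_eq_zero_iff.mp (Nat.le_zero.mp h)
    subst this
    simp [PySem.Chars.replace.go, squeezeOnce]
  | succ n ih =>
    match l with
    | [] => simp [PySem.Chars.replace.go, squeezeOnce]
    | [c] =>
      rw [show PySem.Chars.replace.go [' ', ' '] [' '] (n+1) [c] acc
            = PySem.Chars.replace.go [' ', ' '] [' '] n [] (c :: acc) from by
          simp [PySem.Chars.replace.go]]
      rw [ih [] (c :: acc) (by simp)]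
      simp [squeezeOnce]
    | c :: d :: u =>
      by_cases hcd : c = ' ' ∧ d = ' '
      · obtain ⟨hc, hd⟩ := hcd; subst hc; subst hd
        rw [show PySem.Chars.replace.go [' ', ' '] [' '] (n+1) (' '::' '::u) acc
              = PySem.Chars.replace.go [' ', ' '] [' '] n u (' ' :: acc) from by
            simp [PySem.Chars.replace.go, List.isPrefixOf]]
        rw [ih u (' '::acc) (by simp at h ⊢; omega)]
        simp [squeezeOnce]
      · rw [show PySem.Chars.replace.go [' ', ' '] [' '] (n+1) (c::d::u) acc
              = PySem.Chars.replace.go [' ', ' '] [' '] n (d::u) (c :: acc) from by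
            simp [PySem.Chars.replace.go]
            intro h2 h3
            exact absurd ⟨h2.symm, h3.symm⟩ hcd]
        rw [ih (d::u) (c::acc) (by simp at h ⊢; omega)]
        simp [squeezeOnce, hcd]

theorem replace_dspace (s : List Char) :
    PySem.Chars.replace s [' ', ' '] [' '] = squeezeOnce s := by
  have : PySem.Chars.replace s [' ', ' '] [' ']
      = PySem.Chars.replace.go [' ', ' '] [' '] s.length s [] := by
    simp [PySem.Chars.replace]
  rw [this, replace_go_dspace s.length s [] le_rfl]
  simp

theorem squeezeOnce_cons2 (c d : Char) (t : List Char) :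
    squeezeOnce (c :: d :: t)
      = if c = ' ' ∧ d = ' ' then ' ' :: squeezeOnce t else c :: squeezeOnce (d :: t) := by
  rw [squeezeOnce]

theorem ddSpace_cons2 (c d : Char) (t : List Char) :
    ddSpace (c :: d :: t)
      = ((decide (c = ' ') && decide (d = ' ')) || ddSpace (d :: t)) := by
  rw [ddSpace]

theorem isIn_dspace (s : List Char) : PySem.Chars.isIn [' ', ' '] s = ddSpace s := by
  induction s using ddSpace.induct with
  | case1 =>
    rw [Bool.eq_iff_iff, PySem.Chars.isIn_iff_infix]
    simp [ddSpace]
  | case2 c =>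
    rw [Bool.eq_iff_iff, PySem.Chars.isIn_iff_infix]
    simp only [ddSpace]
    constructor
    · intro hi; exact absurd hi.length_le (by simp)
    · intro hf; exact absurd hf (by simp)
  | case3 c d t ih =>
    rw [Bool.eq_iff_iff, PySem.Chars.isIn_iff_infix, List.infix_cons_iff,
      ddSpace_cons2]
    rw [Bool.eq_iff_iff, PySem.Chars.isIn_iff_infix] at ih
    constructor
    · rintro (hp | hi)
      · simp only [List.cons_prefix_cons] at hp
        simp [hp.1.symm, hp.2.1.symm]
      · simp [ih.mp hi]
    · intro hd
      simp only [Bool.or_eq_true, Bool.and_eq_true, decide_eq_true_eq] at hd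
      rcases hd with ⟨hc, hd⟩ | hd
      · left; simp [List.cons_prefix_cons, hc, hd]
      · right; exact ih.mpr hd

theorem squeezeOnce_length_le (s : List Char) : (squeezeOnce s).length ≤ s.length := by
  induction s using squeezeOnce.induct with
  | case1 => simp [squeezeOnce]
  | case2 c => simp [squeezeOnce]
  | case3 c d t h ih =>
    rw [squeezeOnce_cons2 c d t, if_pos h]
    simp only [List.length_cons]
    omega
  | case4 c d t h ih =>
    rw [squeezeOnce_cons2 c d t, if_neg h]
    simp only [List.length_cons] at ih ⊢
    omega

theorem squeezeOnce_length_lt (s : List Char) (h : ddSpace s = true) :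
    (squeezeOnce s).length < s.length := by
  induction s using squeezeOnce.induct with
  | case1 => simp [ddSpace] at h
  | case2 c => simp [ddSpace] at h
  | case3 c d t hp ih =>
    have := squeezeOnce_length_le t
    rw [squeezeOnce_cons2 c d t, if_pos hp]
    simp only [List.length_cons]
    omega
  | case4 c d t hp ih =>
    rw [ddSpace_cons2] at h
    simp only [Bool.or_eq_true, Bool.and_eq_true, decide_eq_true_eq] at h
    rcases h with hcd | hdd
    · exact absurd hcd hp
    · have := ih hdd
      rw [squeezeOnce_cons2 c d t, if_neg hp]
      simp only [List.length_cons] at this ⊢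
      omega

-- A's 'while "  " in words: words = words.replace("  ", " ")' loop
def pradLoop (s : List Char) : List Char :=
  if h : PySem.Chars.isIn [' ', ' '] s = true then
    pradLoop (PySem.Chars.replace s [' ', ' '] [' '])
  else s
termination_by s.length
decreasing_by
  rw [replace_dspace]
  exact squeezeOnce_length_lt s (by rw [← isIn_dspace]; exact h)

def pradronization (words : String) : String :=
  String.mk (PySem.Chars.upper (pradLoop (punctChars.foldl
    (fun w p => PySem.Chars.replace w [p] [])
    (PySem.Chars.replace words.toList ['-'] [' ']))))

-- ===== PORT B =====
-- one step of B's scan: state = (emitted chars, last-emitted-was-space flag)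
def bStep (st : List Char × Bool) (ch : Char) : List Char × Bool :=
  if ch = '-' ∨ ch = ' ' then
    (if st.2 then st else (st.1 ++ [' '], true))
  else if PySem.Set.contains (PySem.Set.ofList punctChars) ch then st
  else (st.1 ++ [PySem.Chars.upperChar ch], false)

def pradronization_alt (words : String) : String :=
  String.mk (words.toList.foldl bStep (([] : List Char), false)).1

-- ===== PRECONDITION & SPEC =====
def Spec_pradronization (words : String) (out : String) : Prop := out = pradronization_alt words
instance (words : String) (out : String) : Decidable (Spec_pradronization words out) := by unfold Spec_pradronization; infer_instance

-- ===== CLAIM (what is proved, stated in full; the proofs are below) =====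
def Claim_equal_pradronization : Prop := ∀ (words : String), Dom_pradronization words → Spec_pradronization words (pradronization words)

-- ===== LEMMAS AND PROOFS =====

-- per-original-char effect of A's dash pass + punctuation passes
def gChar (c : Char) : List Char :=
  if c = '-' ∨ c = ' ' then [' ']
  else if decide (c ∈ punctChars) then []
  else [c]

theorem replace_go_single (c : Char) (new : List Char) (fuel : Nat) (l acc : List Char)
    (h : l.length ≤ fuel) :
    PySem.Chars.replace.go [c] new fuel l acc
      = acc.reverse ++ l.flatMap (fun d => if d = c then new else [d]) := by
  induction fuel generalizing l acc with
  | zero =>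
    have : l = [] := List.length_eq_zero_iff.mp (Nat.le_zero.mp h)
    subst this; simp [PySem.Chars.replace.go]
  | succ n ih =>
    match l with
    | [] => simp [PySem.Chars.replace.go]
    | d :: t =>
      by_cases hd : d = c
      · subst hd
        rw [show PySem.Chars.replace.go [d] new (n+1) (d::t) acc
              = PySem.Chars.replace.go [d] new n t (new.reverse ++ acc) from by
            simp [PySem.Chars.replace.go, List.isPrefixOf]]
        rw [ih t (new.reverse ++ acc) (by simp at h ⊢; omega)]
        simp
      · rw [show PySem.Chars.replace.go [c] new (n+1) (d::t) acc
              = PySem.Chars.replace.go [c] new n t (d :: acc) from by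
            simp [PySem.Chars.replace.go, List.isPrefixOf]
            intro h2
            exact absurd h2.symm hd]
        rw [ih t (d :: acc) (by simp at h ⊢; omega)]
        simp [hd]

theorem replace_single (s : List Char) (c : Char) (new : List Char) :
    PySem.Chars.replace s [c] new = s.flatMap (fun d => if d = c then new else [d]) := by
  have : PySem.Chars.replace s [c] new = PySem.Chars.replace.go [c] new s.length s [] := by
    simp [PySem.Chars.replace]
  rw [this, replace_go_single c new s.length s [] le_rfl]; simp

theorem replace_del (s : List Char) (c : Char) :
    PySem.Chars.replace s [c] [] = s.filter (fun d => !(decide (d = c))) := by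
  rw [replace_single]
  induction s with
  | nil => rfl
  | cons a t ih =>
    simp only [List.flatMap_cons, List.filter_cons, ih]
    by_cases ha : a = c <;> simp [ha]

theorem foldl_replace_filter (ps : List Char) (s : List Char) :
    ps.foldl (fun w p => PySem.Chars.replace w [p] []) s
      = s.filter (fun d => !(decide (d ∈ ps))) := by
  induction ps generalizing s with
  | nil => simp
  | cons p ps ih =>
    rw [List.foldl_cons, replace_del, ih, List.filter_filter]
    apply List.filter_congr
    intro d _
    by_cases h1 : d ∈ ps <;> by_cases h2 : d = p <;> simp [h1, h2]

theorem pipeline_eq (s : List Char) :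
    punctChars.foldl (fun w p => PySem.Chars.replace w [p] [])
      (PySem.Chars.replace s ['-'] [' ']) = s.flatMap gChar := by
  rw [foldl_replace_filter, replace_single]
  induction s with
  | nil => rfl
  | cons c t ih =>
    simp only [List.flatMap_cons, List.filter_append, ih]
    congr 1
    by_cases h2 : c = '-'
    · subst h2; decide
    · by_cases h3 : c = ' '
      · subst h3; decide
      · rw [if_neg h2]
        unfold gChar
        rw [if_neg (by rintro (h | h); exacts [h2 h, h3 h])]
        by_cases h4 : c ∈ punctChars <;> simp [h4]

-- full space-run collapsing with a flag (what A's while-loop computes)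
def spaceFold : Bool → List Char → List Char
  | _, [] => []
  | flag, c :: t =>
    if c = ' ' then (if flag then spaceFold true t else ' ' :: spaceFold true t)
    else c :: spaceFold false t

theorem spaceFold_nil (flag : Bool) : spaceFold flag [] = [] := by rw [spaceFold]

theorem spaceFold_cons (flag : Bool) (c : Char) (t : List Char) :
    spaceFold flag (c :: t)
      = if c = ' ' then (if flag then spaceFold true t else ' ' :: spaceFold true t)
        else c :: spaceFold false t := by
  rw [spaceFold]

theorem spaceFold_squeezeOnce (flag : Bool) (s : List Char) :
    spaceFold flag (squeezeOnce s) = spaceFold flag s := by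
  induction s using squeezeOnce.induct generalizing flag with
  | case1 => rfl
  | case2 c => rfl
  | case3 c d t hp ih =>
    obtain ⟨hc, hd⟩ := hp; subst hc; subst hd
    rw [squeezeOnce_cons2, if_pos ⟨rfl, rfl⟩, spaceFold_cons, if_pos rfl,
      spaceFold_cons, if_pos rfl, spaceFold_cons, if_pos rfl]
    cases flag with
    | true => exact ih true
    | false =>
      rw [if_neg (by simp), if_neg (by simp), ih true, if_pos rfl]
  | case4 c d t hp ih =>
    rw [squeezeOnce_cons2, if_neg hp]
    by_cases hc : c = ' '
    · subst hc
      rw [spaceFold_cons, if_pos rfl, spaceFold_cons flag, if_pos rfl]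
      cases flag with
      | true => exact ih true
      | false => rw [ih true]
    · rw [spaceFold_cons, if_neg hc, spaceFold_cons flag, if_neg hc, ih false]

theorem spaceFold_no_dd (s : List Char) (h : ddSpace s = false) :
    spaceFold false s = s := by
  induction s using ddSpace.induct with
  | case1 => rfl
  | case2 c =>
    rw [spaceFold_cons]
    by_cases hc : c = ' '
    · rw [if_pos hc, if_neg (by simp), spaceFold_nil, hc]
    · rw [if_neg hc, spaceFold_nil]
  | case3 c d t ih =>
    rw [ddSpace_cons2] at h
    simp only [Bool.or_eq_false_iff, Bool.and_eq_false_iff] at h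
    obtain ⟨hcd, hdd⟩ := h
    have ihdt := ih hdd
    by_cases hc : c = ' '
    · subst hc
      have hd : ¬ d = ' ' := by
        rcases hcd with hcd | hcd
        · simp at hcd
        · simpa using hcd
      rw [spaceFold_cons, if_pos rfl, if_neg (by simp), spaceFold_cons, if_neg hd]
      rw [spaceFold_cons, if_neg hd] at ihdt
      rw [ihdt]
    · rw [spaceFold_cons, if_neg hc, ihdt]

theorem pradLoop_eq (s : List Char) : pradLoop s = spaceFold false s := by
  rw [pradLoop]
  split
  · next h =>
    rw [replace_dspace, pradLoop_eq (squeezeOnce s), spaceFold_squeezeOnce]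
  · next h =>
    exact (spaceFold_no_dd s (by rw [← isIn_dspace]; simpa using h)).symm
termination_by s.length
decreasing_by
  rename_i h
  exact squeezeOnce_length_lt s (by rw [← isIn_dspace]; exact h)

theorem upperChar_space : PySem.Chars.upperChar ' ' = ' ' := by decide

theorem bfold_eq (s : List Char) (acc : List Char) (flag : Bool) :
    (s.foldl bStep (acc, flag)).1
      = acc ++ PySem.Chars.upper (spaceFold flag (s.flatMap gChar)) := by
  induction s generalizing acc flag with
  | nil => simp [spaceFold_nil, PySem.Chars.upper]
  | cons c t ih =>
    rw [List.foldl_cons, List.flatMap_cons]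
    by_cases h1 : c = '-' ∨ c = ' '
    · rw [show gChar c = [' '] from by unfold gChar; rw [if_pos h1]]
      rw [List.singleton_append, spaceFold_cons, if_pos rfl]
      cases flag with
      | true =>
        rw [show bStep (acc, true) c = (acc, true) from by
          unfold bStep; rw [if_pos h1]; rfl]
        rw [if_pos rfl, ih]
      | false =>
        rw [show bStep (acc, false) c = (acc ++ [' '], true) from by
          unfold bStep; rw [if_pos h1]; rfl]
        rw [if_neg (by simp), ih]
        simp [PySem.Chars.upper, upperChar_space]
    · by_cases h2 : c ∈ punctChars
      · have hcon : PySem.Set.contains (PySem.Set.ofList punctChars) c = true := by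
          rw [PySem.Set.contains_iff, PySem.Set.mem_ofList]; exact h2
        rw [show bStep (acc, flag) c = (acc, flag) from by
          unfold bStep; rw [if_neg h1, if_pos hcon]]
        rw [show gChar c = [] from by
          unfold gChar; rw [if_neg h1, if_pos (by simpa using h2)]]
        rw [List.nil_append, ih]
      · have hcon : PySem.Set.contains (PySem.Set.ofList punctChars) c = false := by
          rw [Bool.eq_false_iff]
          intro hx
          exact h2 ((PySem.Set.mem_ofList _ _).mp ((PySem.Set.contains_iff _ _).mp hx))
        have hcs : ¬ c = ' ' := fun hx => h1 (Or.inr hx)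
        rw [show bStep (acc, flag) c = (acc ++ [PySem.Chars.upperChar c], false) from by
          unfold bStep; rw [if_neg h1, hcon]; rfl]
        rw [show gChar c = [c] from by
          unfold gChar; rw [if_neg h1, if_neg (by simpa using h2)]]
        rw [List.singleton_append, spaceFold_cons, if_neg hcs, ih]
        simp [PySem.Chars.upper]

-- ===== VERDICT (by name: the statement is the Claim_ definition above) =====
theorem pradronization_spec : Claim_equal_pradronization := by
  intro words _
  unfold Spec_pradronization pradronization pradronization_alt
  rw [pipeline_eq, pradLoop_eq, bfold_eq]
  simp
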